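-- pv_equiv track=rewrite | github.com/hoelzl/clm | src/clm/cli/commands/summarize.py | _extract_from_py
-- ===== SOURCE A (Python) =====
-- MAX_CONTENT_CHARS = 48_000
--
-- def _extract_from_py(text: str, audience: str) -> str:
--     """Extract content from a jupytext .py file.
--
--     Note: .py files have no per-cell language metadata, so no language
--     filtering is applied here.
--     """
--     parts = []
--     in_markdown = False
--     current_block: list[str] = []
--
--     for line in text.splitlines():
--         if line.startswith("# %%") or line.startswith("# +"):
--             # Flush current block
--             if current_block:
--                 block_text = "\n".join(current_block)
--                 parts.append(block_text)
--                 current_block = []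
--
--             if "[markdown]" in line or "[md]" in line:
--                 in_markdown = True
--             else:
--                 in_markdown = False
--             continue
--
--         if in_markdown:
--             # Strip leading "# " from markdown cells
--             if line.startswith("# "):
--                 current_block.append(line[2:])
--             elif line == "#":
--                 current_block.append("")
--             else:
--                 current_block.append(line)
--         elif audience == "trainer":
--             current_block.append(line)
--
--     if current_block:
--         parts.append("\n".join(current_block))
--
--     content = "\n\n".join(parts)
--     return content[:MAX_CONTENT_CHARS]
-- ===== SOURCE B (Python) =====
-- MAX_CONTENT_CHARS = 48_000
--
--
-- def _extract_from_py(text: str, audience: str) -> str: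
--     """Extract content from a jupytext .py file (two-phase: split into cells, then render)."""
--     # Phase 1: split the lines into cells at each marker line; the lines before
--     # the first marker form an implicit non-markdown cell.
--     cells = [(False, [])]
--     for line in text.splitlines():
--         if line.startswith("# %%") or line.startswith("# +"):
--             cells.append(("[markdown]" in line or "[md]" in line, []))
--         else:
--             cells[-1][1].append(line)
--
--     # Phase 2: render each cell; keep only cells that produce at least one line.
--     rendered = []
--     for is_md, lines in cells:
--         if is_md:
--             out = [l[2:] if l.startswith("# ") else ("" if l == "#" else l) for l in lines]
--         elif audience == "trainer":
--             out = lines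
--         else:
--             out = []
--         if out:
--             rendered.append("\n".join(out))
--
--     return "\n\n".join(rendered)[:MAX_CONTENT_CHARS]
-- ===== Notes on version B (the rewrite author's own statement) =====
-- stated objective: alternative
-- what changed: Replaces A's single stateful loop (in_markdown flag plus incremental flush of current_block) with a two-phase decomposition: first split the lines into (is_markdown, lines) cells at marker lines, then render each cell and keep only non-empty renderings.
import Mathlib
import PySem

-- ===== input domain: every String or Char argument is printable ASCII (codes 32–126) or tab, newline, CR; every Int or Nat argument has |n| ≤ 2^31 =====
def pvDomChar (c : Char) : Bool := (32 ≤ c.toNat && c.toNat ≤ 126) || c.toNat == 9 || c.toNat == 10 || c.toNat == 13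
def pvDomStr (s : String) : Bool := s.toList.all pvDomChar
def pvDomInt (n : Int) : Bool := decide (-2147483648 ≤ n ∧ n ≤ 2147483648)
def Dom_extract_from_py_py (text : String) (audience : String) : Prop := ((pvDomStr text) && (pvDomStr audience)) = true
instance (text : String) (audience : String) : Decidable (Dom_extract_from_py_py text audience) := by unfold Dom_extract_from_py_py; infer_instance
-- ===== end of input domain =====

-- B replaces A's single stateful flush loop by a two-phase decomposition (split into cells, then
-- render and keep the non-empty ones); objective: alternative structure, same cost.


-- ===== PORT A =====
def aMarker (line : String) : Bool :=
  PySem.Str.startswith line "# %%" || PySem.Str.startswith line "# +"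

def aIsMd (line : String) : Bool :=
  PySem.Str.isIn "[markdown]" line || PySem.Str.isIn "[md]" line

-- the markdown branch: '# x' → 'x', '#' → '', other lines unchanged (line[2:] via PySem slice)
def aStrip (line : String) : String :=
  if PySem.Str.startswith line "# " then PySem.Str.slice line (some 2) none
  else if line = "#" then "" else line

-- A's for-loop, state = (parts, in_markdown, current_block); the [] case is the final flush
def aLoop (audience : String) : List String → List String → Bool → List String → List String
  | [], parts, _, cur =>
      if cur = [] then parts else parts ++ [PySem.Str.join "\n" cur]
  | line :: rest, parts, inMd, cur =>
      if aMarker line then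
        aLoop audience rest
          (if cur = [] then parts else parts ++ [PySem.Str.join "\n" cur]) (aIsMd line) []
      else if inMd then
        aLoop audience rest parts inMd (cur ++ [aStrip line])
      else if audience = "trainer" then
        aLoop audience rest parts inMd (cur ++ [line])
      else
        aLoop audience rest parts inMd cur

def extract_from_py_py (text : String) (audience : String) : String :=
  PySem.Str.slice
    (PySem.Str.join "\n\n" (aLoop audience (PySem.Str.splitlines text) [] false []))
    none (some 48000)

-- ===== PORT B =====
def bMarker (line : String) : Bool :=
  PySem.Str.startswith line "# %%" || PySem.Str.startswith line "# +"

def bIsMd (line : String) : Bool :=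
  PySem.Str.isIn "[markdown]" line || PySem.Str.isIn "[md]" line

def bStripLine (line : String) : String :=
  if PySem.Str.startswith line "# " then PySem.Str.slice line (some 2) none
  else if line = "#" then "" else line

-- phase 1 step: a marker opens a new cell, any other line is appended to the last cell
def bStep (cells : List (Bool × List String)) (line : String) : List (Bool × List String) :=
  if bMarker line then cells ++ [(bIsMd line, [])]
  else
    match cells.getLast? with
    | some c => cells.dropLast ++ [(c.1, c.2 ++ [line])]
    | none => cells

-- phase 2: the output lines of one cell
def bRenderCell (audience : String) (c : Bool × List String) : List String :=
  if c.1 then c.2.map bStripLine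
  else if audience = "trainer" then c.2
  else []

def bKeepStep (audience : String) (acc : List String) (c : Bool × List String) : List String :=
  let out := bRenderCell audience c
  if out = [] then acc else acc ++ [PySem.Str.join "\n" out]

def extract_from_py_py_alt (text : String) (audience : String) : String :=
  let cells := (PySem.Str.splitlines text).foldl bStep [(false, [])]
  let rendered := cells.foldl (bKeepStep audience) []
  PySem.Str.slice (PySem.Str.join "\n\n" rendered) none (some 48000)

-- ===== PRECONDITION & SPEC =====
def Spec_extract_from_py_py (text : String) (audience : String) (out : String) : Prop := out = extract_from_py_py_alt text audience
instance (text : String) (audience : String) (out : String) : Decidable (Spec_extract_from_py_py text audience out) := by unfold Spec_extract_from_py_py; infer_instance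

-- ===== CLAIM (what is proved, stated in full; the proofs are below) =====
def Claim_equal_extract_from_py_py : Prop := ∀ (text : String) (audience : String), Dom_extract_from_py_py text audience → Spec_extract_from_py_py text audience (extract_from_py_py text audience)

-- ===== LEMMAS AND PROOFS =====

-- the A-side and B-side line helpers are the same functions
theorem aMarker_eq (l : String) : aMarker l = bMarker l := rfl
theorem aIsMd_eq (l : String) : aIsMd l = bIsMd l := rfl
theorem aStrip_eq (l : String) : aStrip l = bStripLine l := rfl

-- recursive characterization of phase 1 given a pending cell (b, cur)
def cellsF (b : Bool) (cur : List String) : List String → List (Bool × List String)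
  | [] => [(b, cur)]
  | line :: rest =>
      if bMarker line then (b, cur) :: cellsF (bIsMd line) [] rest
      else cellsF b (cur ++ [line]) rest

theorem foldl_bStep_eq (lines : List String) :
    ∀ (acc : List (Bool × List String)) (b : Bool) (cur : List String),
      lines.foldl bStep (acc ++ [(b, cur)]) = acc ++ cellsF b cur lines := by
  induction lines with
  | nil => intro acc b cur; simp [cellsF]
  | cons line rest ih =>
      intro acc b cur
      by_cases h : bMarker line = true
      · have hs : bStep (acc ++ [(b, cur)]) line = (acc ++ [(b, cur)]) ++ [(bIsMd line, [])] := by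
          simp [bStep, h]
        simp only [List.foldl_cons, hs, ih]
        simp [cellsF, h]
      · have hs : bStep (acc ++ [(b, cur)]) line = acc ++ [(b, cur ++ [line])] := by
          simp [bStep, h]
        simp only [List.foldl_cons, hs, ih]
        simp [cellsF, h]

theorem bRenderCell_empty (audience : String) (x : Bool) :
    bRenderCell audience (x, []) = [] := by
  cases x <;> simp [bRenderCell]

-- A's loop, started on a pending cell whose rendered lines are rc, computes phase 2 of cellsF
theorem aLoop_eq_render (audience : String) (lines : List String) :
    ∀ (parts : List String) (b : Bool) (cur rc : List String),
      rc = bRenderCell audience (b, cur) →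
      aLoop audience lines parts b rc =
        (cellsF b cur lines).foldl (bKeepStep audience) parts := by
  induction lines with
  | nil =>
      intro parts b cur rc hrc
      subst hrc
      simp [aLoop, cellsF, bKeepStep]
  | cons line rest ih =>
      intro parts b cur rc hrc
      subst hrc
      by_cases hm : bMarker line = true
      · simp only [aLoop, aMarker_eq, aIsMd_eq, cellsF, hm, if_pos, List.foldl_cons]
        rw [ih _ (bIsMd line) [] [] (bRenderCell_empty audience (bIsMd line)).symm]
        simp [bKeepStep]
      · cases b with
        | true =>
            simp only [aLoop, aMarker_eq, aStrip_eq, cellsF, hm, Bool.false_eq_true, if_pos,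
              if_false]
            exact ih parts true (cur ++ [line]) _ (by simp [bRenderCell])
        | false =>
            by_cases ht : audience = "trainer"
            · subst ht
              simp only [aLoop, aMarker_eq, cellsF, hm, Bool.false_eq_true, if_false]
              refine ih parts false (cur ++ [line]) _ ?_
              simp [bRenderCell]
            · simp only [aLoop, aMarker_eq, cellsF, hm, ht, Bool.false_eq_true, if_false]
              exact ih parts false (cur ++ [line]) _
                (by simp [bRenderCell, ht])

-- ===== VERDICT (by name: the statement is the Claim_ definition above) =====
theorem extract_from_py_py_spec : Claim_equal_extract_from_py_py := by
  intro text audience _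
  unfold Spec_extract_from_py_py extract_from_py_py extract_from_py_py_alt
  have h1 : (PySem.Str.splitlines text).foldl bStep [(false, [])] =
      cellsF false [] (PySem.Str.splitlines text) := by
    simpa using foldl_bStep_eq (PySem.Str.splitlines text) [] false []
  have h2 : aLoop audience (PySem.Str.splitlines text) [] false [] =
      (cellsF false [] (PySem.Str.splitlines text)).foldl (bKeepStep audience) [] :=
    aLoop_eq_render audience (PySem.Str.splitlines text) [] false []
      [] (bRenderCell_empty audience false).symm
  simp only [h1, h2]
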